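-- pv_equiv track=rewrite | github.com/Karimk94/EDMS-API | routes/auth.py | _extract_group_membership_flags
-- ===== SOURCE A (Python) =====
-- EMS_ADMIN_GROUP_ID = 'EMS_ADMIN'
--
-- DOCS_SUPERVISORS_GROUP_ID = 'DOCS_SUPERVISORS'
--
-- def _extract_group_membership_flags(user_groups: list) -> dict:
--     """Derive cached group membership flags from DMS groups payload."""
--     is_ems_admin_group_member = False
--     is_docs_supervisor = False
--
--     for group in user_groups or []:
--         group_id = str(group.get('group_id', '')).strip().upper()
--         group_name = str(group.get('group_name', '')).strip().upper()
--         if group_id == EMS_ADMIN_GROUP_ID.upper() or group_name == EMS_ADMIN_GROUP_ID.upper():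
--             is_ems_admin_group_member = True
--         if group_id == DOCS_SUPERVISORS_GROUP_ID.upper() or group_name == DOCS_SUPERVISORS_GROUP_ID.upper():
--             is_docs_supervisor = True
--
--     return {
--         'is_ems_admin_group_member': is_ems_admin_group_member,
--         'is_docs_supervisor': is_docs_supervisor,
--     }
-- ===== SOURCE B (Python) =====
-- EMS_ADMIN_GROUP_ID = 'EMS_ADMIN'
--
-- DOCS_SUPERVISORS_GROUP_ID = 'DOCS_SUPERVISORS'
--
-- def _extract_group_membership_flags(user_groups: list) -> dict:
--     """Derive cached group membership flags from DMS groups payload."""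
--     def member_of(target: str) -> bool:
--         target = target.upper()
--         return any(
--             target in (str(g.get('group_id', '')).strip().upper(),
--                        str(g.get('group_name', '')).strip().upper())
--             for g in (user_groups or [])
--         )
--
--     return {
--         'is_ems_admin_group_member': member_of(EMS_ADMIN_GROUP_ID),
--         'is_docs_supervisor': member_of(DOCS_SUPERVISORS_GROUP_ID),
--     }
-- ===== Notes on version B (the rewrite author's own statement) =====
-- stated objective: idiomatic
-- what changed: B replaces A's single accumulator loop that conditionally sets two boolean flags with a reusable short-circuiting predicate member_of(target) built on any(), called once per flag: two independent staged passes with early exit instead of one full traversal with mutable state.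
import Mathlib
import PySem

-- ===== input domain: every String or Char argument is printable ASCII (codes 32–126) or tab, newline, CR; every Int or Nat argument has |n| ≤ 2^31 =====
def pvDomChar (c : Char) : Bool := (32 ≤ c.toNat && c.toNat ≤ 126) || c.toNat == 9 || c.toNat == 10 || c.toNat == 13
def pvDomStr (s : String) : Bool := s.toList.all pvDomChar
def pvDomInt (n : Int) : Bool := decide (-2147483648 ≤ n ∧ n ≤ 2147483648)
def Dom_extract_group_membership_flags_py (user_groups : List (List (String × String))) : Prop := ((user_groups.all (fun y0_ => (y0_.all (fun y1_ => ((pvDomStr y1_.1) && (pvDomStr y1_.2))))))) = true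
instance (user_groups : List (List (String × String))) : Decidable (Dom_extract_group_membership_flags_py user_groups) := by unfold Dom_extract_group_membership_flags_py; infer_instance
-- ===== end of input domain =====

-- B replaces A's single flag-accumulating loop with a short-circuiting predicate
-- member_of(target), invoked once per flag (two staged passes); idiomatic, same O(n).

-- shared helper: str(group.get(k, '')).strip().upper() (the dict values are already strings)
def pvNorm (group : List (String × String)) (k : String) : String :=
  PySem.Str.upper (PySem.Str.strip ((PySem.Dict.ofList group).getD k ""))

-- ===== PORT A =====
def extract_group_membership_flags_py (user_groups : List (List (String × String))) : List (String × Bool) :=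
  let st := user_groups.foldl (fun (acc : Bool × Bool) group =>
    let group_id := pvNorm group "group_id"
    let group_name := pvNorm group "group_name"
    ((if group_id == PySem.Str.upper "EMS_ADMIN" || group_name == PySem.Str.upper "EMS_ADMIN" then true else acc.1),
     (if group_id == PySem.Str.upper "DOCS_SUPERVISORS" || group_name == PySem.Str.upper "DOCS_SUPERVISORS" then true else acc.2))) (false, false)
  [("is_ems_admin_group_member", st.1), ("is_docs_supervisor", st.2)]

-- ===== PORT B =====
-- member_of(target): any g with target among its two normalized tokens (List.any short-circuits like Python's any)
def pvMemberOf (user_groups : List (List (String × String))) (target : String) : Bool :=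
  let target := PySem.Str.upper target
  user_groups.any (fun g => target == pvNorm g "group_id" || target == pvNorm g "group_name")

def extract_group_membership_flags_py_alt (user_groups : List (List (String × String))) : List (String × Bool) :=
  [("is_ems_admin_group_member", pvMemberOf user_groups "EMS_ADMIN"),
   ("is_docs_supervisor", pvMemberOf user_groups "DOCS_SUPERVISORS")]

-- ===== PRECONDITION & SPEC =====
def Spec_extract_group_membership_flags_py (user_groups : List (List (String × String))) (out : List (String × Bool)) : Prop := out = extract_group_membership_flags_py_alt user_groups
instance (user_groups : List (List (String × String))) (out : List (String × Bool)) : Decidable (Spec_extract_group_membership_flags_py user_groups out) := by unfold Spec_extract_group_membership_flags_py; infer_instance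

-- ===== CLAIM (what is proved, stated in full; the proofs are below) =====
def Claim_equal_extract_group_membership_flags_py : Prop := ∀ (user_groups : List (List (String × String))), Dom_extract_group_membership_flags_py user_groups → Spec_extract_group_membership_flags_py user_groups (extract_group_membership_flags_py user_groups)

-- ===== LEMMAS AND PROOFS =====

theorem beq_comm' (a b : String) : (a == b) = (b == a) := by
  by_cases h : a = b <;> simp [h, Ne.symm]

-- A's loop: each flag is the OR of its per-group test over the list (E, D kept abstract).
theorem foldA_eq (E D : String) (l : List (List (String × String))) (e d : Bool) :
    l.foldl (fun (acc : Bool × Bool) group =>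
      ((if pvNorm group "group_id" == E || pvNorm group "group_name" == E then true else acc.1),
       (if pvNorm group "group_id" == D || pvNorm group "group_name" == D then true else acc.2))) (e, d)
    = (e || l.any (fun g => pvNorm g "group_id" == E || pvNorm g "group_name" == E),
       d || l.any (fun g => pvNorm g "group_id" == D || pvNorm g "group_name" == D)) := by
  induction l generalizing e d with
  | nil => simp
  | cons g t ih =>
      simp only [List.foldl_cons, List.any_cons, ih, Prod.mk.injEq]
      cases hE : (pvNorm g "group_id" == E || pvNorm g "group_name" == E) <;>
        cases hD : (pvNorm g "group_id" == D || pvNorm g "group_name" == D) <;>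
          simp

theorem any_beq_comm (x : String) (l : List (List (String × String))) :
    (l.any (fun g => pvNorm g "group_id" == x || pvNorm g "group_name" == x))
      = l.any (fun g => x == pvNorm g "group_id" || x == pvNorm g "group_name") := by
  refine List.any_congr rfl (fun g => ?_)
  rw [beq_comm' (pvNorm g "group_id") x, beq_comm' (pvNorm g "group_name") x]

-- ===== VERDICT (by name: the statement is the Claim_ definition above) =====
theorem extract_group_membership_flags_py_spec : Claim_equal_extract_group_membership_flags_py := by
  intro user_groups _
  show _ = _
  simp only [extract_group_membership_flags_py, extract_group_membership_flags_py_alt, pvMemberOf]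
  rw [foldA_eq]
  simp only [Bool.false_or]
  rw [any_beq_comm, any_beq_comm]
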